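-- pv_equiv track=rewrite | github.com/milana322/Colloquium | main.py | generate_factorials
-- ===== SOURCE A (Python) =====
-- import math
--
-- def generate_factorials(n):
--     """
--     генерирует список первых n факториалов
--     n - натуральное число, количество факториалов
--     factorials - cписок первых n факториалов
--     raises ValueError - если n < 1
--     """
--     if not isinstance(n, int):
--         raise ValueError("Входное значение n должно быть целым числом.")
--     if n < 1:
--         raise ValueError("n должно быть натуральным числом (n >= 1).")
--
--     factorials = []
--     for i in range(1, n + 1):
--         factorials.append(math.factorial(i))
--
--     return factorials
-- ===== SOURCE B (Python) =====
-- def generate_factorials(n):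
--     """Running incremental product: one multiplication per element instead of
--     recomputing each factorial from scratch."""
--     if not isinstance(n, int):
--         raise ValueError("Входное значение n должно быть целым числом.")
--     if n < 1:
--         raise ValueError("n должно быть натуральным числом (n >= 1).")
--     factorials = []
--     fact = 1
--     for i in range(1, n + 1):
--         fact *= i
--         factorials.append(fact)
--     return factorials
-- ===== Notes on version B (the rewrite author's own statement) =====
-- stated objective: faster
-- what changed: B keeps a running product (fact *= i) and appends it, instead of calling math.factorial(i) from scratch at every iteration; asymptotically fewer multiplications, confirmed.
import Mathlib
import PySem

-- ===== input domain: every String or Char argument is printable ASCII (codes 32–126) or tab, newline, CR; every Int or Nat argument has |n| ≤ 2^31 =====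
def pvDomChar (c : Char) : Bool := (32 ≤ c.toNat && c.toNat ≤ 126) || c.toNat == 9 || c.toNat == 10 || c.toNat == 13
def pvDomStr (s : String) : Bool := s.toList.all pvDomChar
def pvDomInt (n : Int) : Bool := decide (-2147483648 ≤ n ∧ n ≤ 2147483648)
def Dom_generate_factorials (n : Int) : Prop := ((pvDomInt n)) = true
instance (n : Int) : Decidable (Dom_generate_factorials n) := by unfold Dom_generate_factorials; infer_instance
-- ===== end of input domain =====

-- B replaces the per-iteration math.factorial(i) call by a running product (fact *= i): O(n) instead of O(n^2) multiplications (intended as faster; confirmed).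


-- ===== PORT A =====
-- math.factorial on a nonnegative Int (exact on the inputs A reaches: i ≥ 1)
def pyFactorial (i : Int) : Int := (Nat.factorial i.toNat : Int)

def generate_factorials (n : Int) : List Int :=
  (PySem.List.pyRange 1 (n + 1) 1).foldl (fun factorials i => factorials ++ [pyFactorial i]) []

-- ===== PORT B =====
def generate_factorials_alt (n : Int) : List Int :=
  ((PySem.List.pyRange 1 (n + 1) 1).foldl
    (fun (st : Int × List Int) i => (st.1 * i, st.2 ++ [st.1 * i])) (1, [])).2

-- ===== PRECONDITION & SPEC =====
-- A raises ValueError on non-positive n; those inputs are excluded.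
def Pre_generate_factorials (n : Int) : Prop := 0 < n
instance (n : Int) : Decidable (Pre_generate_factorials n) := by unfold Pre_generate_factorials; infer_instance
def pvWitness_generate_factorials : Int := (5)

def Spec_generate_factorials (n : Int) (out : List Int) : Prop := out = generate_factorials_alt n
instance (n : Int) (out : List Int) : Decidable (Spec_generate_factorials n out) := by unfold Spec_generate_factorials; infer_instance

-- ===== CLAIM (what is proved, stated in full; the proofs are below) =====
def Claim_equal_generate_factorials : Prop := ∀ (n : Int), Dom_generate_factorials n → Pre_generate_factorials n → Spec_generate_factorials n (generate_factorials n)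

-- ===== LEMMAS AND PROOFS =====

-- Loop invariant: after processing 1..k, B's state is (k!, A's list).
theorem gf_invariant (k : Nat) :
    (PySem.List.pyRange 1 ((k : Int) + 1) 1).foldl
      (fun (st : Int × List Int) i => (st.1 * i, st.2 ++ [st.1 * i])) (1, [])
    = ((Nat.factorial k : Int),
       (PySem.List.pyRange 1 ((k : Int) + 1) 1).foldl
         (fun factorials i => factorials ++ [pyFactorial i]) []) := by
  induction k with
  | zero => simp [PySem.List.pyRange_one_eq_nil, Nat.factorial]
  | succ k ih =>
    have h1 : (1 : Int) ≤ (k : Int) + 1 := by omega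
    have hr : PySem.List.pyRange 1 ((↑(k+1) : Int) + 1) 1
        = PySem.List.pyRange 1 ((k : Int) + 1) 1 ++ [(k : Int) + 1] := by
      push_cast
      exact PySem.List.pyRange_one_succ_right h1
    have hfac : pyFactorial ((k : Int) + 1) = (Nat.factorial k : Int) * ((k : Int) + 1) := by
      unfold pyFactorial
      have ht : ((k : Int) + 1).toNat = k + 1 := by omega
      rw [ht, Nat.factorial_succ]; push_cast; ring
    have hfst : (Nat.factorial k : Int) * ((k : Int) + 1) = (Nat.factorial (k+1) : Int) := by
      rw [Nat.factorial_succ]; push_cast; ring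
    rw [hr, List.foldl_append, List.foldl_append, ih]
    simp only [List.foldl_cons, List.foldl_nil]
    rw [hfac, hfst]

-- ===== VERDICT (by name: the statement is the Claim_ definition above) =====
theorem generate_factorials_spec : Claim_equal_generate_factorials := by
  intro n _ hpre
  unfold Pre_generate_factorials at hpre
  unfold Spec_generate_factorials generate_factorials generate_factorials_alt
  have hn : n = (n.toNat : Int) := by omega
  rw [hn, gf_invariant n.toNat]
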